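-- pv_equiv track=rewrite | github.com/pilotwaffle/TORQ-CONSOLE | torq_console/spec_kit/marvin_quality_engine.py | _parse_improvements
-- ===== SOURCE A (Python) =====
-- from typing import Dict, List, Any, Optional
--
-- def _parse_improvements(improvements_text: str) -> List[Dict[str, str]]:
--     """Parse improvement suggestions from AI response."""
--     improvements = []
--
--     # Simple parsing - extract paragraphs as improvements
--     current_improvement = {}
--     lines = improvements_text.split('\n')
--
--     for line in lines:
--         line = line.strip()
--         if not line:
--             if current_improvement:
--                 improvements.append(current_improvement)
--                 current_improvement = {}
--             continue
--
--         # Try to detect structured format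
--         if 'what' in line.lower() and ':' in line:
--             current_improvement['what'] = line.split(':', 1)[1].strip()
--         elif 'why' in line.lower() and ':' in line:
--             current_improvement['why'] = line.split(':', 1)[1].strip()
--         elif 'impact' in line.lower() and ':' in line:
--             current_improvement['impact'] = line.split(':', 1)[1].strip()
--         elif line.startswith(('-', '*', '•', '1', '2', '3', '4', '5')):
--             # Unstructured improvement
--             if 'description' not in current_improvement:
--                 current_improvement['description'] = line.lstrip('-*•0123456789. ').strip()
--
--     # Add last improvement if exists
--     if current_improvement:
--         improvements.append(current_improvement)
--
--     return improvements
-- ===== SOURCE B (Python) =====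
-- from typing import Dict, List
--
--
-- def _take_block(lines: List[str]) -> (List[str], List[str]):
--     """Longest prefix of non-empty lines, and the remainder."""
--     k = 0
--     while k < len(lines) and lines[k]:
--         k += 1
--     return lines[:k], lines[k:]
--
--
-- def _classify(d: Dict[str, str], line: str) -> None:
--     """Apply one non-empty stripped line to the improvement dict d."""
--     low = line.lower()
--     if 'what' in low and ':' in line:
--         d['what'] = line.split(':', 1)[1].strip()
--     elif 'why' in low and ':' in line:
--         d['why'] = line.split(':', 1)[1].strip()
--     elif 'impact' in low and ':' in line:
--         d['impact'] = line.split(':', 1)[1].strip()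
--     elif line.startswith(('-', '*', '•', '1', '2', '3', '4', '5')):
--         if 'description' not in d:
--             d['description'] = line.lstrip('-*•0123456789. ').strip()
--
--
-- def _parse_block(block: List[str]) -> Dict[str, str]:
--     """Parse one block of non-empty stripped lines into a dict."""
--     d = {}
--     for line in block:
--         _classify(d, line)
--     return d
--
--
-- def _parse_improvements(improvements_text: str) -> List[Dict[str, str]]:
--     """Parse improvement suggestions from AI response (block-wise)."""
--     lines = [l.strip() for l in improvements_text.split('\n')]
--     result = []
--     while lines:
--         if not lines[0]:
--             lines = lines[1:]
--         else:
--             block, lines = _take_block(lines)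
--             d = _parse_block(block)
--             if d:
--                 result.append(d)
--     return result
-- ===== Notes on version B (the rewrite author's own statement) =====
-- stated objective: alternative
-- what changed: A threads a (result, current_dict) accumulator through one pass over all lines; B first cuts the stripped lines into blank-separated blocks (_take_block) and then parses each block independently with a pure per-block fold, keeping the non-empty dicts.
import Mathlib
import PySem

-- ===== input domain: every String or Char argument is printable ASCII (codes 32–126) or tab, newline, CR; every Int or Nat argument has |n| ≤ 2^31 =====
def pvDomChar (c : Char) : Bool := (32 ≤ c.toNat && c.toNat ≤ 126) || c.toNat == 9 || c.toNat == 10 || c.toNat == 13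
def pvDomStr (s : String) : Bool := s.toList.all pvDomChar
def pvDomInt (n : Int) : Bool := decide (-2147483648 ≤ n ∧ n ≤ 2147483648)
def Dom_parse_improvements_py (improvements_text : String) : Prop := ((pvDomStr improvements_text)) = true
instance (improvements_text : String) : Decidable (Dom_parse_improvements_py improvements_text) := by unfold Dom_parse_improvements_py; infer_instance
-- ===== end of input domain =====

-- B re-implements _parse_improvements by splitting the stripped lines into blank-separated
-- blocks (two-phase: group then parse each block), instead of A's single threaded-accumulator
-- loop; same return value, alternative decomposition (no speed claim).


-- shared primitive, not in PySem: s.lstrip(chars) — drop leading chars from the given set (exact)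
def pvLstripChars (s : String) (chars : List Char) : String :=
  String.ofList (s.toList.dropWhile (fun c => chars.contains c))

-- ===== PORT A =====
-- A: one pass over the lines, threading (improvements, current_improvement).
-- text.split('\n') = PySem.Str.split? … "\n" (the separator is non-empty, so it is `some`);
-- line.split(':', 1)[1] is ported with unreachable defaults: the branch guard guarantees ':' ∈ line.
def parse_improvements_py (improvements_text : String) : List (List (String × String)) :=
  let lines := (PySem.Str.split? improvements_text "\n").getD []
  let res :=
    lines.foldl
      (fun (st : List (PySem.Dict String String) × PySem.Dict String String) l₀ =>
        let line := PySem.Str.strip l₀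
        if line = "" then
          if st.2.items ≠ [] then (st.1 ++ [st.2], PySem.Dict.empty) else st
        else
          (st.1,
            if PySem.Str.isIn "what" (PySem.Str.lower line) && PySem.Str.isIn ":" line then
              st.2.insert "what" (PySem.Str.strip (((PySem.Str.splitMax? line ":" 1).getD []).getD 1 ""))
            else if PySem.Str.isIn "why" (PySem.Str.lower line) && PySem.Str.isIn ":" line then
              st.2.insert "why" (PySem.Str.strip (((PySem.Str.splitMax? line ":" 1).getD []).getD 1 ""))
            else if PySem.Str.isIn "impact" (PySem.Str.lower line) && PySem.Str.isIn ":" line then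
              st.2.insert "impact" (PySem.Str.strip (((PySem.Str.splitMax? line ":" 1).getD []).getD 1 ""))
            else if PySem.Str.startswith line "-" || PySem.Str.startswith line "*" ||
                    PySem.Str.startswith line "•" || PySem.Str.startswith line "1" ||
                    PySem.Str.startswith line "2" || PySem.Str.startswith line "3" ||
                    PySem.Str.startswith line "4" || PySem.Str.startswith line "5" then
              if (st.2.get? "description").isNone then
                st.2.insert "description" (PySem.Str.strip (pvLstripChars line "-*•0123456789. ".toList))
              else st.2
            else st.2))
      ([], PySem.Dict.empty)
  let improvements := if res.2.items ≠ [] then res.1 ++ [res.2] else res.1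
  improvements.map (·.items)

-- ===== PORT B =====
-- B helper _classify: apply one non-empty stripped line to the dict.
def bClassify (d : PySem.Dict String String) (line : String) : PySem.Dict String String :=
  if PySem.Str.isIn "what" (PySem.Str.lower line) && PySem.Str.isIn ":" line then
    d.insert "what" (PySem.Str.strip (((PySem.Str.splitMax? line ":" 1).getD []).getD 1 ""))
  else if PySem.Str.isIn "why" (PySem.Str.lower line) && PySem.Str.isIn ":" line then
    d.insert "why" (PySem.Str.strip (((PySem.Str.splitMax? line ":" 1).getD []).getD 1 ""))
  else if PySem.Str.isIn "impact" (PySem.Str.lower line) && PySem.Str.isIn ":" line then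
    d.insert "impact" (PySem.Str.strip (((PySem.Str.splitMax? line ":" 1).getD []).getD 1 ""))
  else if PySem.Str.startswith line "-" || PySem.Str.startswith line "*" ||
          PySem.Str.startswith line "•" || PySem.Str.startswith line "1" ||
          PySem.Str.startswith line "2" || PySem.Str.startswith line "3" ||
          PySem.Str.startswith line "4" || PySem.Str.startswith line "5" then
    if (d.get? "description").isNone then
      d.insert "description" (PySem.Str.strip (pvLstripChars line "-*•0123456789. ".toList))
    else d
  else d

-- B helper _parse_block: fold the classifier over one block.
def bParseBlock (block : List String) : PySem.Dict String String :=
  block.foldl bClassify PySem.Dict.empty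

-- B helper _take_block: longest prefix of non-empty lines ('while k < len and lines[k]'),
-- realised as structural recursion on the list (exact).
def bTakeBlock : List String → List String × List String
  | [] => ([], [])
  | l :: t => if l = "" then ([], l :: t) else ((l :: (bTakeBlock t).1), (bTakeBlock t).2)

theorem bTakeBlock_snd_length_le : ∀ ls : List String, (bTakeBlock ls).2.length ≤ ls.length := by
  intro ls
  induction ls with
  | nil => simp [bTakeBlock]
  | cons l t ih =>
    by_cases h : l = "" <;> simp [bTakeBlock, h]
    omega

-- B main loop: while lines: skip a blank line or cut off one block, parse it, keep it if non-empty.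
def bLoop : List String → List (PySem.Dict String String) → List (PySem.Dict String String)
  | [], result => result
  | l :: t, result =>
    if _h : l = "" then bLoop t result
    else
      let p := bTakeBlock (l :: t)
      let d := bParseBlock p.1
      bLoop p.2 (if d.items ≠ [] then result ++ [d] else result)
  termination_by ls _ => ls.length
  decreasing_by
  · simp
  · simp only [bTakeBlock, if_neg _h]
    have := bTakeBlock_snd_length_le t
    simp
    omega

def parse_improvements_py_alt (improvements_text : String) : List (List (String × String)) :=
  let lines := ((PySem.Str.split? improvements_text "\n").getD []).map PySem.Str.strip
  (bLoop lines []).map (·.items)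

-- ===== PRECONDITION & SPEC =====
def Spec_parse_improvements_py (improvements_text : String) (out : List (List (String × String))) : Prop := out = parse_improvements_py_alt improvements_text
instance (improvements_text : String) (out : List (List (String × String))) : Decidable (Spec_parse_improvements_py improvements_text out) := by unfold Spec_parse_improvements_py; infer_instance

-- ===== CLAIM (what is proved, stated in full; the proofs are below) =====
def Claim_equal_parse_improvements_py : Prop := ∀ (improvements_text : String), Dom_parse_improvements_py improvements_text → Spec_parse_improvements_py improvements_text (parse_improvements_py improvements_text)

-- ===== LEMMAS AND PROOFS =====

-- A's loop body on an already-stripped line (the strip factored out).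
def gStep (st : List (PySem.Dict String String) × PySem.Dict String String) (line : String) :
    List (PySem.Dict String String) × PySem.Dict String String :=
  if line = "" then
    if st.2.items ≠ [] then (st.1 ++ [st.2], PySem.Dict.empty) else st
  else (st.1, bClassify st.2 line)

def finishA (st : List (PySem.Dict String String) × PySem.Dict String String) :
    List (PySem.Dict String String) :=
  if st.2.items ≠ [] then st.1 ++ [st.2] else st.1

theorem items_empty : (PySem.Dict.empty : PySem.Dict String String).items = [] := rfl

theorem gStep_nonblank (st : List (PySem.Dict String String) × PySem.Dict String String)
    {line : String} (h : ¬ line = "") : gStep st line = (st.1, bClassify st.2 line) := by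
  simp [gStep, h]

theorem gStep_blank (st : List (PySem.Dict String String) × PySem.Dict String String) :
    gStep st "" = if st.2.items ≠ [] then (st.1 ++ [st.2], PySem.Dict.empty) else st := by
  simp [gStep]

-- equation lemmas for bLoop (well-founded recursion)
theorem bLoop_nil (r : List (PySem.Dict String String)) : bLoop [] r = r := by
  simp [bLoop]

theorem bLoop_blank (t : List String) (r : List (PySem.Dict String String)) :
    bLoop ("" :: t) r = bLoop t r := by
  rw [bLoop]
  simp

theorem bLoop_block {l : String} (t : List String) (r : List (PySem.Dict String String))
    (h : ¬ l = "") :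
    bLoop (l :: t) r =
      bLoop (bTakeBlock (l :: t)).2
        (if (bParseBlock (bTakeBlock (l :: t)).1).items ≠ []
         then r ++ [bParseBlock (bTakeBlock (l :: t)).1] else r) := by
  rw [bLoop]
  simp [h]

-- folding A's step through one whole block
theorem foldl_gStep_block : ∀ (ls : List String)
    (imps : List (PySem.Dict String String)) (cur : PySem.Dict String String),
    ls.foldl gStep (imps, cur) =
      (bTakeBlock ls).2.foldl gStep (imps, (bTakeBlock ls).1.foldl bClassify cur) := by
  intro ls
  induction ls with
  | nil => intro imps cur; simp [bTakeBlock]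
  | cons l t ih =>
    intro imps cur
    by_cases h : l = ""
    · simp [bTakeBlock, h]
    · simp only [List.foldl_cons, gStep_nonblank (imps, cur) h, bTakeBlock, if_neg h]
      exact ih imps (bClassify cur l)

-- the remainder returned by _take_block is empty or starts with a blank line
theorem bTakeBlock_snd_shape : ∀ ls : List String,
    (bTakeBlock ls).2 = [] ∨ ∃ t', (bTakeBlock ls).2 = "" :: t' := by
  intro ls
  induction ls with
  | nil => left; simp [bTakeBlock]
  | cons l t ih =>
    by_cases h : l = ""
    · right; exact ⟨t, by simp [bTakeBlock, h]⟩
    · simpa [bTakeBlock, h] using ih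

theorem dict_empty_of_items_nil {d : PySem.Dict String String} (h : d.items = []) :
    d = PySem.Dict.empty := PySem.Dict.ext (by simpa using h)

-- main bridge: A's threaded loop, started at a block boundary, equals B's block loop
theorem main_bridge : ∀ (n : Nat) (ls : List String), ls.length ≤ n →
    ∀ imps : List (PySem.Dict String String),
    finishA (ls.foldl gStep (imps, PySem.Dict.empty)) = bLoop ls imps := by
  intro n
  induction n with
  | zero =>
    intro ls hlen imps
    have : ls = [] := List.length_eq_zero_iff.mp (Nat.le_zero.mp hlen)
    subst this
    simp [bLoop_nil, finishA, items_empty]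
  | succ n ih =>
    intro ls hlen imps
    match ls with
    | [] => simp [bLoop_nil, finishA, items_empty]
    | l :: t =>
      simp only [List.length_cons] at hlen
      by_cases h : l = ""
      · subst h
        have hstep : gStep (imps, PySem.Dict.empty) "" = (imps, PySem.Dict.empty) := by
          rw [gStep_blank]; simp [items_empty]
        rw [List.foldl_cons, hstep, bLoop_blank]
        exact ih t (by omega) imps
      · rw [foldl_gStep_block (l :: t) imps PySem.Dict.empty, bLoop_block t imps h]
        have hdfold : (bTakeBlock (l :: t)).1.foldl bClassify PySem.Dict.empty
            = bParseBlock (bTakeBlock (l :: t)).1 := rfl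
        rw [hdfold]
        set d := bParseBlock (bTakeBlock (l :: t)).1 with hd
        have hrlen : (bTakeBlock (l :: t)).2.length ≤ t.length + 1 := by
          simpa using bTakeBlock_snd_length_le (l :: t)
        rcases bTakeBlock_snd_shape (l :: t) with hr | ⟨t', hr⟩
        · rw [hr, List.foldl_nil, bLoop_nil]
          by_cases hdnil : d.items = [] <;> simp [finishA, hdnil]
        · rw [hr]
          have ht'len : t'.length ≤ n := by
            rw [hr] at hrlen
            simp at hrlen
            omega
          rw [List.foldl_cons, gStep_blank]
          by_cases hdnil : d.items = []
          · have hde : d = PySem.Dict.empty := dict_empty_of_items_nil hdnil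
            rw [if_neg (by simpa using hdnil), bLoop_blank, if_neg (by simpa using hdnil), hde]
            exact ih t' ht'len imps
          · rw [if_pos (by simpa using hdnil), bLoop_blank, if_pos (by simpa using hdnil)]
            exact ih t' ht'len (imps ++ [d])

-- ===== VERDICT (by name: the statement is the Claim_ definition above) =====
theorem parse_improvements_py_spec : Claim_equal_parse_improvements_py := by
  intro t _
  unfold Spec_parse_improvements_py parse_improvements_py parse_improvements_py_alt
  show (finishA (((PySem.Str.split? t "\n").getD []).foldl
      (fun st l₀ => gStep st (PySem.Str.strip l₀)) ([], PySem.Dict.empty))).map (·.items)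
    = (bLoop (((PySem.Str.split? t "\n").getD []).map PySem.Str.strip) []).map (·.items)
  rw [← List.foldl_map (f := PySem.Str.strip) (g := gStep)]
  rw [main_bridge (((PySem.Str.split? t "\n").getD []).map PySem.Str.strip).length _ le_rfl []]
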